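-- pv_equiv track=rewrite | github.com/iyevenko/AdventOfCode | 2022/5.py | parse_boxes
-- ===== SOURCE A (Python) =====
-- def parse_boxes(boxes):
-- 	M = len(boxes)
-- 	N = len(boxes[0])
--
-- 	stacks = [[] for _ in range(N)]
--
-- 	for j in range(N):
-- 		for i in reversed(range(M)):
-- 			b = boxes[i][j]
-- 			if b == ' ':
-- 				break
-- 			stacks[j].append(b)
--
-- 	return stacks
-- ===== SOURCE B (Python) =====
-- def _step(ds, b):
--     done, stack = ds
--     if done:
--         return ds
--     if b == ' ':
--         return (True, stack)
--     return (done, stack + [b])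
--
--
-- def parse_boxes(boxes):
--     N = len(boxes[0])
--     state = [(False, []) for _ in range(N)]
--     for row in reversed(boxes):
--         state = [_step(ds, b) for ds, b in zip(state, row)]
--     return [stack for _, stack in state]
-- ===== Notes on version B (the rewrite author's own statement) =====
-- stated objective: alternative
-- what changed: B makes one row-major pass over reversed(boxes), carrying a per-column (done, stack) pair rebuilt with zip, instead of A's column-major nested loops with an inner break.
-- outside the precondition, e.g. on parse_boxes([['a', 'a'], ['b'], ['c', ' ']]): A returns [['c', 'b', 'a'], []], B returns [['c', 'b', 'a']]
import Mathlib
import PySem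

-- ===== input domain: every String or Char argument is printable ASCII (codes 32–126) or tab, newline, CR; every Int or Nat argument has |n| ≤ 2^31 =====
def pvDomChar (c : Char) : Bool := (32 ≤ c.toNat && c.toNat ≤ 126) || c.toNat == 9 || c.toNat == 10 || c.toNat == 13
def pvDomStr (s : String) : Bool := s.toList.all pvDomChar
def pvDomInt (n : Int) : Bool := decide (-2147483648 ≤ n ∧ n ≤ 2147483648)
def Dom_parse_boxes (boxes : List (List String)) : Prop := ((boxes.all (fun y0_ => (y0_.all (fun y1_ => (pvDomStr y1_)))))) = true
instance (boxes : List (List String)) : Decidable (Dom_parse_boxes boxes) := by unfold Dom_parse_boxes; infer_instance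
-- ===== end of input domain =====

-- B: one row-major pass with per-column (done, stack) pairs rebuilt via zip, instead of A's column-major nested loops with break; alternative decomposition, not faster.


-- ===== PORT A =====
-- A's inner loop: scan one column j from the bottom row up, stopping at the first ' ' cell.
def scanA (boxes : List (List String)) (j : Nat) : List Nat → List String
  | [] => []
  | i :: is =>
    let b := (boxes.getD i []).getD j ""
    if b = " " then [] else b :: scanA boxes j is

def parse_boxes (boxes : List (List String)) : List (List String) :=
  let M := boxes.length
  let N := (boxes.headD []).length
  (List.range N).map (fun j => scanA boxes j (List.range M).reverse)

-- ===== PORT B =====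
def stepB (ds : Bool × List String) (b : String) : Bool × List String :=
  if ds.1 then ds
  else if b = " " then (true, ds.2)
  else (ds.1, ds.2 ++ [b])

def parse_boxes_alt (boxes : List (List String)) : List (List String) :=
  let N := (boxes.headD []).length
  let state := boxes.reverse.foldl
    (fun st row => (st.zip row).map (fun p => stepB p.1 p.2))
    (List.replicate N (false, ([] : List String)))
  state.map (fun p => p.2)

-- ===== PRECONDITION & SPEC =====
-- Pre_ excludes the empty list (A raises IndexError on boxes[0]) and ragged inputs with a row
-- shorter than the first row: on those A usually raises IndexError, and where a ' ' cell happens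
-- to shield the short row so A still returns, B's zip-truncation drops trailing columns instead.
def Pre_parse_boxes (boxes : List (List String)) : Prop :=
  boxes ≠ [] ∧ ∀ r ∈ boxes, (boxes.headD []).length ≤ r.length
instance (boxes : List (List String)) : Decidable (Pre_parse_boxes boxes) := by
  unfold Pre_parse_boxes; infer_instance

def pvWitness_parse_boxes : List (List String) := [["a", "b"], [" ", "c"]]

def Spec_parse_boxes (boxes : List (List String)) (out : List (List String)) : Prop := out = parse_boxes_alt boxes
instance (boxes : List (List String)) (out : List (List String)) : Decidable (Spec_parse_boxes boxes out) := by unfold Spec_parse_boxes; infer_instance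

-- ===== CLAIM (what is proved, stated in full; the proofs are below) =====
def Claim_equal_parse_boxes : Prop := ∀ (boxes : List (List String)), Dom_parse_boxes boxes → Pre_parse_boxes boxes → Spec_parse_boxes boxes (parse_boxes boxes)

-- ===== LEMMAS AND PROOFS =====

-- common spec: scan a list of rows (bottom-up order) at column j, stopping at the first " ".
def scanRows (j : Nat) : List (List String) → List String
  | [] => []
  | r :: rs =>
    let b := r.getD j ""
    if b = " " then [] else b :: scanRows j rs

theorem scanA_eq_scanRows (boxes : List (List String)) (j : Nat) (is : List Nat) :
    scanA boxes j is = scanRows j (is.map (fun i => boxes.getD i [])) := by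
  induction is with
  | nil => rfl
  | cons i is ih => simp [scanA, scanRows, ih]

theorem range_reverse_map_getD (boxes : List (List String)) :
    (List.range boxes.length).reverse.map (fun i => boxes.getD i []) = boxes.reverse := by
  rw [List.map_reverse]
  congr 1
  apply List.ext_getElem
  · simp
  · intro n h1 h2
    simp [List.getD_eq_getElem?_getD, h2]

-- per-column fold of B's step over a list of rows
def colFoldB (t : Bool × List String) (j : Nat) (rows : List (List String)) : Bool × List String :=
  rows.foldl (fun t r => stepB t (r.getD j "")) t

theorem colFoldB_true (acc : List String) (j : Nat) (rows : List (List String)) :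
    colFoldB (true, acc) j rows = (true, acc) := by
  induction rows with
  | nil => rfl
  | cons r rs ih => simpa [colFoldB, stepB] using ih

theorem colFoldB_snd (acc : List String) (j : Nat) (rows : List (List String)) :
    (colFoldB (false, acc) j rows).2 = acc ++ scanRows j rows := by
  induction rows generalizing acc with
  | nil => simp [colFoldB, scanRows]
  | cons r rs ih =>
    have h1 : colFoldB (false, acc) j (r :: rs)
        = colFoldB (stepB (false, acc) (r.getD j "")) j rs := rfl
    rw [h1]
    by_cases hb : r.getD j "" = " "
    all_goals rw [List.getD_eq_getElem?_getD] at hb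
    · have h2 : stepB (false, acc) (r.getD j "") = (true, acc) := by simp [stepB, hb]
      rw [h2, colFoldB_true]
      simp [scanRows, hb]
    · have h2 : stepB (false, acc) (r.getD j "") = (false, acc ++ [r.getD j ""]) := by
        simp [stepB, hb]
      rw [h2, ih]
      simp [scanRows, hb]

theorem foldB_eq_cols (N : Nat) (rows : List (List String)) :
    ∀ (s : List (Bool × List String)), s.length = N → (∀ r ∈ rows, N ≤ r.length) →
    rows.foldl (fun st row => (st.zip row).map (fun p => stepB p.1 p.2)) s
      = (List.range N).map (fun j => colFoldB (s.getD j (false, [])) j rows) := by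
  induction rows with
  | nil =>
    intro s hs _
    apply List.ext_getElem
    · simp [hs]
    · intro n h1 h2
      have hn : n < s.length := by simpa using h1
      simp [colFoldB, hn]
  | cons r rs ih =>
    intro s hs hlen
    have hr : N ≤ r.length := hlen r (by simp)
    have hzip : ((s.zip r).map (fun p => stepB p.1 p.2)).length = N := by
      simp [hs]; omega
    rw [List.foldl_cons, ih _ hzip (fun r hr => hlen r (by simp [hr]))]
    apply List.map_congr_left
    intro j hj
    simp only [List.mem_range] at hj
    have hjs : j < s.length := by omega
    have hjr : j < r.length := by omega
    have : ((s.zip r).map (fun p => stepB p.1 p.2)).getD j (false, [])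
        = stepB (s.getD j (false, [])) (r.getD j "") := by
      have hjz : j < (s.zip r).length := by simp; omega
      simp [List.getD_eq_getElem?_getD, hjs, hjr, List.getElem_zip]
    rw [this]
    simp [colFoldB]

theorem parse_boxes_eq_common (boxes : List (List String)) :
    parse_boxes boxes = (List.range (boxes.headD []).length).map
      (fun j => scanRows j boxes.reverse) := by
  unfold parse_boxes
  simp only []
  apply List.map_congr_left
  intro j _
  rw [scanA_eq_scanRows, range_reverse_map_getD]

-- ===== VERDICT (by name: the statement is the Claim_ definition above) =====
theorem parse_boxes_spec : Claim_equal_parse_boxes := by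
  intro boxes _ hpre
  obtain ⟨hne, hlen⟩ := hpre
  unfold Spec_parse_boxes
  rw [parse_boxes_eq_common]
  unfold parse_boxes_alt
  simp only []
  rw [foldB_eq_cols _ _ _ (by simp) (fun r hr => hlen r (List.mem_reverse.mp hr))]
  rw [List.map_map]
  apply List.map_congr_left
  intro j hj
  simp only [List.mem_range] at hj
  have hj' : j < (boxes.head?.getD []).length := by cases boxes <;> simp at hj ⊢ <;> omega
  simp [Function.comp, List.getD_eq_getElem?_getD, hj', colFoldB_snd]
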